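-- pv_equiv track=rewrite | github.com/whereismyguts/rest | app/api.py | check_temp
-- ===== SOURCE A (Python) =====
-- def check_temp(tmp_list):
--
--     prev_sign = None
--     for tmp in tmp_list:
--         if tmp['t_air'] == 0:
--             return True
--
--         sign = tmp['t_air'] > 0 - tmp['t_air'] < 0
--         if prev_sign is not None:
--             if sign != prev_sign:
--                 return True
--         prev_sign = sign
--     return False
-- ===== SOURCE B (Python) =====
-- def check_temp(tmp_list):
--     lo = None
--     hi = None
--     for tmp in tmp_list:
--         x = tmp['t_air']
--         lo = x if lo is None or x < lo else lo
--         hi = x if hi is None or x > hi else hi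
--         if lo <= 0 <= hi:
--             return True
--     return False
-- ===== Notes on version B (the rewrite author's own statement) =====
-- stated objective: alternative
-- what changed: Replaces the prev_sign state machine (with the obscure chained comparison 't>0-t<0') by a running min/max interval: the trigger 'zero seen, or both signs seen' becomes 'the interval [lo,hi] of values seen so far contains 0'.
import Mathlib
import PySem

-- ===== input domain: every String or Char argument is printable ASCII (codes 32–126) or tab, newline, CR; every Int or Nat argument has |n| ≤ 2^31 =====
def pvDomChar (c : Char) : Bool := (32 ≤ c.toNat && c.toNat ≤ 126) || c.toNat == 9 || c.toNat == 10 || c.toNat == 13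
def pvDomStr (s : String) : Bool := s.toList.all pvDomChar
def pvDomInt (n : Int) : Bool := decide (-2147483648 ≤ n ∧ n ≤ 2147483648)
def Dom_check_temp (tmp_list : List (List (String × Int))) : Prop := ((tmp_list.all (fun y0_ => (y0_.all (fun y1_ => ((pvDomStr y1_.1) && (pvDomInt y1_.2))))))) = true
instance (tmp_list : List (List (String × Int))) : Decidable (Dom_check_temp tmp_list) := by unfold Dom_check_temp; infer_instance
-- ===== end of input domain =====

-- B replaces A's prev_sign state machine (with the obscure chained comparison 't > 0 - t < 0')
-- by a running min/max interval: return True as soon as the interval [lo, hi] of the values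
-- seen so far contains 0 (i.e. a zero, or both a positive and a negative value, was seen).


-- ===== PORT A =====
-- the for-loop of A, carrying prev_sign : Option Bool; a missing 't_air' key is a
-- KeyError in Python (excluded by Pre_), modelled here as returning false
def check_temp_loop (l : List (List (String × Int))) (prev_sign : Option Bool) : Bool :=
  match l with
  | [] => false
  | tmp :: rest =>
    match (PySem.Dict.mk tmp).get? "t_air" with
    | none => false   -- KeyError; outside Pre_
    | some t =>
      if t = 0 then true
      else
        -- sign = tmp['t_air'] > 0 - tmp['t_air'] < 0  (chained comparison)
        let sign := decide (t > 0 - t) && decide (0 - t < 0)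
        match prev_sign with
        | some p => if sign ≠ p then true else check_temp_loop rest (some sign)
        | none => check_temp_loop rest (some sign)

def check_temp (tmp_list : List (List (String × Int))) : Bool :=
  check_temp_loop tmp_list none

-- ===== PORT B =====
def check_temp_alt_loop (l : List (List (String × Int))) (lo hi : Option Int) : Bool :=
  match l with
  | [] => false
  | tmp :: rest =>
    match (PySem.Dict.mk tmp).get? "t_air" with
    | none => false   -- KeyError; outside Pre_
    | some x =>
      let lo' : Int := match lo with | none => x | some a => if x < a then x else a
      let hi' : Int := match hi with | none => x | some b => if x > b then x else b
      if lo' ≤ 0 ∧ 0 ≤ hi' then true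
      else check_temp_alt_loop rest (some lo') (some hi')

def check_temp_alt (tmp_list : List (List (String × Int))) : Bool :=
  check_temp_alt_loop tmp_list none none

-- ===== PRECONDITION & SPEC =====
-- value of 't_air' in a dict, if present
def tAir (d : List (String × Int)) : Option Int := (PySem.Dict.mk d).get? "t_air"

-- Pre_ excludes exactly the inputs where Python A raises KeyError: a dict without the key
-- 't_air' is reached before any trigger (a zero, or both a positive and a negative value)
-- occurs among the dicts preceding it.
def Pre_check_temp (tmp_list : List (List (String × Int))) : Prop :=
  (∀ d ∈ tmp_list, (tAir d).isSome = true) ∨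
  (let p := tmp_list.takeWhile (fun d => (tAir d).isSome);
   (∃ d ∈ p, tAir d = some 0) ∨
   ((∃ d ∈ p, ∃ v, tAir d = some v ∧ 0 < v) ∧ (∃ d ∈ p, ∃ v, tAir d = some v ∧ v < 0)))
instance (tmp_list : List (List (String × Int))) : Decidable (Pre_check_temp tmp_list) := by unfold Pre_check_temp; infer_instance

def pvWitness_check_temp : (List (List (String × Int))) := [[("t_air", 3)], [("t_air", -2)]]

def Spec_check_temp (tmp_list : List (List (String × Int))) (out : Bool) : Prop := out = check_temp_alt tmp_list
instance (tmp_list : List (List (String × Int))) (out : Bool) : Decidable (Spec_check_temp tmp_list out) := by unfold Spec_check_temp; infer_instance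

-- ===== CLAIM (what is proved, stated in full; the proofs are below) =====
def Claim_equal_check_temp : Prop := ∀ (tmp_list : List (List (String × Int))), Dom_check_temp tmp_list → Pre_check_temp tmp_list → Spec_check_temp tmp_list (check_temp tmp_list)

-- ===== LEMMAS AND PROOFS =====

-- invariant: after a run of nonzero elements of constant sign s, A holds prev_sign = some s
-- while B holds an interval [a, b] lying strictly on that side of 0
theorem loop_agree (l : List (List (String × Int))) (s : Bool) (a b : Int)
    (hs : if s then 0 < a ∧ 0 < b else a < 0 ∧ b < 0) :
    check_temp_loop l (some s) = check_temp_alt_loop l (some a) (some b) := by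
  induction l generalizing s a b with
  | nil => rfl
  | cons tmp rest ih =>
    simp only [check_temp_loop, check_temp_alt_loop]
    cases h : (PySem.Dict.mk tmp).get? "t_air" with
    | none => rfl
    | some x =>
      by_cases h0 : x = 0
      · cases s <;> simp_all <;> constructor <;> split <;> omega
      · have hsgn : (decide (x > 0 - x) && decide (0 - x < 0)) = decide (x > 0) := by
          rcases lt_trichotomy x 0 with h1 | h1 | h1 <;> simp [h1]
        simp only [if_neg h0, hsgn]
        have hx : x < 0 ∨ 0 < x := by omega
        cases s <;> simp at hs <;> rcases hx with h1 | h1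
        · -- s = false, x < 0: same sign, continue
          have : ¬ ((if x < a then x else a) ≤ 0 ∧ 0 ≤ (if x > b then x else b)) := by
            split <;> split <;> omega
          simp [not_lt_of_gt, h1, this]
          exact ih false _ _ (by constructor <;> split <;> omega)
        · -- s = false, x > 0: sign change, both return true
          have : ((if x < a then x else a) ≤ 0 ∧ 0 ≤ (if x > b then x else b)) := by
            constructor <;> split <;> omega
          simp [h1, this]
        · -- s = true, x < 0: sign change, both return true
          have : ((if x < a then x else a) ≤ 0 ∧ 0 ≤ (if x > b then x else b)) := by
            constructor <;> split <;> omega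
          simp [not_lt_of_gt h1, this]
        · -- s = true, x > 0: same sign, continue
          have : ¬ ((if x < a then x else a) ≤ 0 ∧ 0 ≤ (if x > b then x else b)) := by
            split <;> split <;> omega
          simp [h1, this]
          exact ih true _ _ (by constructor <;> split <;> omega)

-- ===== VERDICT (by name: the statement is the Claim_ definition above) =====
theorem check_temp_spec : Claim_equal_check_temp := by
  intro tmp_list _ _
  unfold Spec_check_temp check_temp check_temp_alt
  cases tmp_list with
  | nil => rfl
  | cons tmp rest =>
    simp only [check_temp_loop, check_temp_alt_loop]
    cases h : (PySem.Dict.mk tmp).get? "t_air" with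
    | none => rfl
    | some x =>
      by_cases h0 : x = 0
      · simp [h0]
      · have hsgn : (decide (x > 0 - x) && decide (0 - x < 0)) = decide (x > 0) := by
          rcases lt_trichotomy x 0 with h1 | h1 | h1 <;> simp [h1]
        simp only [if_neg h0, hsgn]
        have hx : x < 0 ∨ 0 < x := by omega
        have hnot : ¬ (x ≤ 0 ∧ 0 ≤ x) := by omega
        rcases hx with h1 | h1
        · simp [not_lt_of_gt, h1, hnot]
          exact loop_agree rest false x x (by simp; omega)
        · simp [h1, hnot]
          exact loop_agree rest true x x (by simp; omega)
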